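-- pv_equiv track=rewrite | github.com/Citeli-py/MetaHeuristicas-PDLC | silver-meal.py | custo
-- ===== SOURCE A (Python) =====
-- def custo(s, demanda, h, i, j):
--     """Calcula o custo total e estoque máximo para um lote do período i ao j"""
--     custo_total = s  # Custo fixo
--     producao = sum(demanda[i-1:j])  # Produção necessária para cobrir i até j
--     estoque_max = 0
--     estoque_atual = producao
--
--     for k in range(i, j+1):
--         if k > len(demanda):
--             break
--         estoque_atual -= demanda[k-1]  # Consome a demanda do período
--         custo_total += estoque_atual * h  # Custo de estoque
--         estoque_max = max(estoque_max, estoque_atual)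
--
--     return custo_total, estoque_max
-- ===== SOURCE B (Python) =====
-- def custo(s, demanda, h, i, j):
--     """Custo total via soma ponderada por duracao de estoque; estoque maximo via min do consumo acumulado."""
--     n = len(demanda)
--     hi = min(j, n)
--     producao = sum(demanda[i-1:j])
--     if i > hi:
--         return s, 0
--     # each unit demanded in period k sits in stock for (hi - k + 1) cost-charging steps fewer than producao
--     weighted = sum(demanda[k-1] * (hi - k + 1) for k in range(i, hi + 1))
--     custo_total = s + h * ((hi - i + 1) * producao - weighted)
--     # peak inventory = producao minus the smallest cumulative consumption seen
--     cum = 0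
--     mn = None
--     for k in range(i, hi + 1):
--         cum += demanda[k-1]
--         mn = cum if mn is None else min(mn, cum)
--     return custo_total, max(0, producao - mn)
-- ===== Notes on version B (the rewrite author's own statement) =====
-- stated objective: alternative
-- what changed: Replaces the per-period inventory simulation loop by a closed-form holding-duration weighted sum for the total cost plus a separate running-minimum scan of cumulative consumption for the peak inventory.
import Mathlib
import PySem

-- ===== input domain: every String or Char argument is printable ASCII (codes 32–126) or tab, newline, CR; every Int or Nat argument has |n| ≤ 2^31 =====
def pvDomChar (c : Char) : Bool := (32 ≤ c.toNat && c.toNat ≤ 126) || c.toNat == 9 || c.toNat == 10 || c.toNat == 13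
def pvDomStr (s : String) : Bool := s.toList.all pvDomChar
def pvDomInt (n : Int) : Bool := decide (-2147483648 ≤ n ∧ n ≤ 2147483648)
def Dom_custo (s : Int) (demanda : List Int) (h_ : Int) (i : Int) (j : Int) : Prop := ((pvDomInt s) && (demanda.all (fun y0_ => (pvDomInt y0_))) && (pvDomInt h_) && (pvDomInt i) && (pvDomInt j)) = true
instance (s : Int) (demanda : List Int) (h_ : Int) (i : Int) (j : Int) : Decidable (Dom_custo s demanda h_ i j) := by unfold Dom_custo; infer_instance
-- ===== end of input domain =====

-- B replaces A's inventory-simulation loop by a duration-weighted cost sum plus a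
-- separate running-minimum scan for the peak inventory (objective: alternative).

-- ===== PORT A =====
-- state: (custo_total, estoque_max, estoque_atual); break when k > len(demanda).
-- demanda[k-1] is ported as pyGetD … 0: Pre_custo guarantees the index is in range
-- wherever the loop body runs (Python raises IndexError exactly outside Pre_custo).
def custoLoopA (demanda : List Int) (h_ : Int) : List Int → Int × Int × Int → Int × Int × Int
  | [], st => st
  | k :: rest, st =>
    if (demanda.length : Int) < k then st
    else
      let e := st.2.2 - PySem.List.pyGetD demanda (k - 1) 0
      custoLoopA demanda h_ rest (st.1 + e * h_, max st.2.1 e, e)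

def custo (s : Int) (demanda : List Int) (h_ : Int) (i : Int) (j : Int) : Int × Int :=
  let producao := (PySem.List.slice demanda (some (i - 1)) (some j)).sum
  let r := custoLoopA demanda h_ (PySem.List.pyRange i (j + 1) 1) (s, 0, producao)
  (r.1, r.2.1)

-- ===== PORT B =====
-- running state: (minimum cumulative consumption so far (none before the first period), cumulative consumption)
def minCumLoop (demanda : List Int) : List Int → Option Int × Int → Option Int × Int
  | [], p => p
  | k :: rest, p =>
    let cum := p.2 + PySem.List.pyGetD demanda (k - 1) 0
    minCumLoop demanda rest
      (some (match p.1 with | none => cum | some m => min m cum), cum)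

def custo_alt (s : Int) (demanda : List Int) (h_ : Int) (i : Int) (j : Int) : Int × Int :=
  let n : Int := demanda.length
  let hi := min j n
  let producao := (PySem.List.slice demanda (some (i - 1)) (some j)).sum
  if hi < i then (s, 0)
  else
    let ks := PySem.List.pyRange i (hi + 1) 1
    let weighted := (ks.map (fun k => PySem.List.pyGetD demanda (k - 1) 0 * (hi - k + 1))).sum
    let custo_total := s + h_ * ((hi - i + 1) * producao - weighted)
    let mn := (minCumLoop demanda ks (none, 0)).1.getD 0
    (custo_total, max 0 (producao - mn))

-- ===== PRECONDITION & SPEC =====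
-- Pre_ excludes exactly the inputs where Python A (and B alike) raises IndexError:
-- the loop runs at least one step (i ≤ min(j, len)) and the first index i-1 is below -len.
def Pre_custo (s : Int) (demanda : List Int) (h_ : Int) (i : Int) (j : Int) : Prop :=
  min j (demanda.length : Int) < i ∨ 1 - (demanda.length : Int) ≤ i
instance (s : Int) (demanda : List Int) (h_ : Int) (i : Int) (j : Int) : Decidable (Pre_custo s demanda h_ i j) := by unfold Pre_custo; infer_instance
def pvWitness_custo : Int × List Int × Int × Int × Int := (1, [2, 3], 1, 1, 2)

def Spec_custo (s : Int) (demanda : List Int) (h_ : Int) (i : Int) (j : Int) (out : Int × Int) : Prop := out = custo_alt s demanda h_ i j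
instance (s : Int) (demanda : List Int) (h_ : Int) (i : Int) (j : Int) (out : Int × Int) : Decidable (Spec_custo s demanda h_ i j out) := by unfold Spec_custo; infer_instance

-- ===== CLAIM (what is proved, stated in full; the proofs are below) =====
def Claim_equal_custo : Prop := ∀ (s : Int) (demanda : List Int) (h_ : Int) (i : Int) (j : Int), Dom_custo s demanda h_ i j → Pre_custo s demanda h_ i j → Spec_custo s demanda h_ i j (custo s demanda h_ i j)

-- ===== LEMMAS AND PROOFS =====

-- suffix-weighted sum of the accessed demands: Σ d_k · (#elements from k to the end)
def wsum (demanda : List Int) : List Int → Int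
  | [] => 0
  | k :: rest => PySem.List.pyGetD demanda (k - 1) 0 * ((rest.length : Int) + 1) + wsum demanda rest

-- minimum cumulative consumption over the list (none if empty)
def mncum (demanda : List Int) : List Int → Option Int
  | [] => none
  | k :: rest =>
    some (match mncum demanda rest with
          | none => PySem.List.pyGetD demanda (k - 1) 0
          | some m => min (PySem.List.pyGetD demanda (k - 1) 0)
                          (PySem.List.pyGetD demanda (k - 1) 0 + m))

theorem max_shift (m e d mn : Int) :
    max (max m (e - d)) (e - d - mn) = max m (e - min d (d + mn)) := by
  simp only [Int.max_def, Int.min_def]; split_ifs <;> omega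

theorem min_shift (m cum0 d mn : Int) :
    min (min m (cum0 + d)) (cum0 + d + mn) = min m (cum0 + min d (d + mn)) := by
  simp only [Int.min_def]; split_ifs <;> omega

theorem min_shift' (cum0 d mn : Int) :
    min (cum0 + d) (cum0 + d + mn) = cum0 + min d (d + mn) := by
  simp only [Int.min_def]; split_ifs <;> omega

theorem custoLoopA_char (demanda : List Int) (h_ : Int) (ks : List Int)
    (hks : ∀ k ∈ ks, k ≤ (demanda.length : Int)) (c m e : Int) :
    custoLoopA demanda h_ ks (c, m, e)
      = (c + h_ * ((ks.length : Int) * e - wsum demanda ks),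
         (match mncum demanda ks with | none => m | some mn => max m (e - mn)),
         e - (ks.map (fun k => PySem.List.pyGetD demanda (k - 1) 0)).sum) := by
  induction ks generalizing c m e with
  | nil => simp [custoLoopA, wsum, mncum]
  | cons k rest ih =>
    have hk : k ≤ (demanda.length : Int) := hks k (by simp)
    have hrest : ∀ k' ∈ rest, k' ≤ (demanda.length : Int) := fun k' h' => hks k' (by simp [h'])
    simp only [custoLoopA, if_neg (by omega : ¬ (demanda.length : Int) < k)]
    rw [ih hrest]
    refine Prod.ext ?_ (Prod.ext ?_ ?_)
    · simp only [wsum, List.length_cons]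
      push_cast
      ring
    · simp only [mncum]
      cases hmn : mncum demanda rest with
      | none => simp
      | some mn =>
        simp only []
        exact max_shift m e (PySem.List.pyGetD demanda (k - 1) 0) mn
    · simp only [List.map_cons, List.sum_cons]
      ring

theorem custoLoopA_skip (demanda : List Int) (h_ : Int) (a b : Int)
    (ha : (demanda.length : Int) < a ∨ b ≤ a) (st : Int × Int × Int) :
    custoLoopA demanda h_ (PySem.List.pyRange a b 1) st = st := by
  by_cases hba : b ≤ a
  · rw [PySem.List.pyRange_one_eq_nil hba]; rfl
  · rw [PySem.List.pyRange_one_cons (by omega)]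
    simp [custoLoopA, if_pos (by omega : (demanda.length : Int) < a)]

theorem custoLoopA_append (demanda : List Int) (h_ : Int) (l1 l2 : List Int)
    (hl1 : ∀ k ∈ l1, k ≤ (demanda.length : Int)) (st : Int × Int × Int) :
    custoLoopA demanda h_ (l1 ++ l2) st = custoLoopA demanda h_ l2 (custoLoopA demanda h_ l1 st) := by
  induction l1 generalizing st with
  | nil => simp [custoLoopA]
  | cons k rest ih =>
    have hk : k ≤ (demanda.length : Int) := hl1 k (by simp)
    simp only [List.cons_append, custoLoopA, if_neg (by omega : ¬ (demanda.length : Int) < k)]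
    exact ih (fun k' h' => hl1 k' (by simp [h'])) _

-- B's weighted sum over pyRange a (hi+1) equals the suffix-weighted sum
theorem weighted_eq_wsum (demanda : List Int) (hi : Int) :
    ∀ (t : Nat) (a : Int), a + t = hi + 1 →
    ((PySem.List.pyRange a (hi + 1) 1).map
        (fun k => PySem.List.pyGetD demanda (k - 1) 0 * (hi - k + 1))).sum
      = wsum demanda (PySem.List.pyRange a (hi + 1) 1) := by
  intro t
  induction t with
  | zero =>
    intro a ha
    rw [PySem.List.pyRange_one_eq_nil (by omega)]
    simp [wsum]
  | succ t ih =>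
    intro a ha
    rw [PySem.List.pyRange_one_cons (by omega)]
    simp only [List.map_cons, List.sum_cons, wsum]
    rw [ih (a + 1) (by omega), PySem.List.length_pyRange_one]
    have h1 : ((hi + 1 - (a + 1)).toNat : Int) = hi - a := by omega
    rw [h1]

-- B's running-minimum scan computes mncum (shifted by the starting cumulative sum)
theorem minCumLoop_char (demanda : List Int) (ks : List Int) :
    ∀ (mo : Option Int) (cum0 : Int),
    (minCumLoop demanda ks (mo, cum0)).1
      = (match mo, mncum demanda ks with
         | none, none => none
         | some m, none => some m
         | none, some mn => some (cum0 + mn)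
         | some m, some mn => some (min m (cum0 + mn))) := by
  induction ks with
  | nil => intro mo cum0; cases mo <;> simp [minCumLoop, mncum]
  | cons k rest ih =>
    intro mo cum0
    simp only [minCumLoop, mncum]
    cases mo with
    | none =>
      rw [ih (some (cum0 + PySem.List.pyGetD demanda (k - 1) 0))
            (cum0 + PySem.List.pyGetD demanda (k - 1) 0)]
      cases hmn : mncum demanda rest with
      | none => simp
      | some mn =>
        simp only []
        congr 1
        have := min_shift' cum0 (PySem.List.pyGetD demanda (k - 1) 0) mn
        rw [show cum0 + PySem.List.pyGetD demanda (k - 1) 0 + mn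
              = cum0 + (PySem.List.pyGetD demanda (k - 1) 0 + mn) by ring]
        omega
    | some m =>
      rw [ih (some (min m (cum0 + PySem.List.pyGetD demanda (k - 1) 0)))
            (cum0 + PySem.List.pyGetD demanda (k - 1) 0)]
      cases hmn : mncum demanda rest with
      | none => simp
      | some mn =>
        simp only []
        congr 1
        have := min_shift m cum0 (PySem.List.pyGetD demanda (k - 1) 0) mn
        omega

-- ===== VERDICT (by name: the statement is the Claim_ definition above) =====
theorem custo_spec : Claim_equal_custo := by
  intro s demanda h_ i j _hdom hpre
  unfold Spec_custo custo custo_alt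
  dsimp only
  set n : Int := (demanda.length : Int) with hn
  set P := (PySem.List.slice demanda (some (i - 1)) (some j)).sum with hP
  by_cases hcase : min j n < i
  · -- loop never runs a full step: either the range is empty or the first k breaks
    rw [if_pos hcase]
    by_cases hji : j + 1 ≤ i
    · rw [PySem.List.pyRange_one_eq_nil hji]; simp [custoLoopA]
    · rw [custoLoopA_skip demanda h_ i (j + 1) (by omega)]
  · rw [if_neg hcase]
    have hihi : i ≤ min j n := by omega
    set hi := min j n with hhi
    have hmem : ∀ k ∈ PySem.List.pyRange i (hi + 1) 1, k ≤ (demanda.length : Int) := by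
      intro k hk
      have := (PySem.List.mem_pyRange_one).1 hk
      omega
    -- split A's range at hi+1; the tail (if any) starts above n and breaks at once
    rw [PySem.List.pyRange_one_append i (hi + 1) (j + 1) (by omega) (by omega),
        custoLoopA_append demanda h_ _ _ hmem,
        custoLoopA_skip demanda h_ (hi + 1) (j + 1) (by omega),
        custoLoopA_char demanda h_ _ hmem]
    have hne : PySem.List.pyRange i (hi + 1) 1 = i :: PySem.List.pyRange (i + 1) (hi + 1) 1 :=
      PySem.List.pyRange_one_cons (by omega)
    dsimp only
    refine Prod.ext ?_ ?_
    · -- cost component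
      rw [weighted_eq_wsum demanda hi (hi + 1 - i).toNat i (by omega),
          PySem.List.length_pyRange_one]
      have h1 : ((hi + 1 - i).toNat : Int) = hi - i + 1 := by omega
      rw [h1]
    · -- peak-inventory component
      rw [minCumLoop_char demanda _ none 0]
      cases hmn : mncum demanda (PySem.List.pyRange i (hi + 1) 1) with
      | none => rw [hne] at hmn; simp [mncum] at hmn
      | some mn => simp
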